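-- pv_equiv track=rewrite | github.com/datawhalechina/huawei-od-python | codes/others100/173-the-k-th-longest-string.py | solve_method
-- ===== SOURCE A (Python) =====
-- from collections import defaultdict
--
-- def solve_method(s, k):
--     # 字符频次字典，key为字符，value为连续字母的最大出现次数
--     dic_len = defaultdict(int)
--
--     pre_ch = s[0]
--     word = []
--     for ch in s:
--         if ch == pre_ch:
--             # 如果与前一个字母相同，则加入到单词列表中
--             word.append(ch)
--         else:
--             # 如果与前一个字母不同，则更新前一个连续字符的最大出现次数
--             dic_len[pre_ch] = max(dic_len[pre_ch], len(word))
--             # 保存当前字符串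
--             pre_ch = ch
--             # 更新单词列表
--             word = [ch]
--
--     if word and pre_ch:
--         dic_len[pre_ch] = max(dic_len[pre_ch], len(word))
--
--     # 将字符频次字典按照字符出现次数从大到小进行排序
--     tuple_len = sorted(dic_len.items(), key=lambda x: -x[1])
--     # 子串数小于k，找不到返回-1
--     if k - 1 >= len(tuple_len):
--         return -1
--     else:
--         return tuple_len[k - 1][1]
-- ===== SOURCE B (Python) =====
-- def solve_method(s, k):
--     # Per-character counting scans: for each distinct character a dedicated pass
--     # over s measures its longest run; then pick the (k-1)-th largest value.
--     vals = []
--     for c in dict.fromkeys(s):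
--         best = cur = 0
--         for ch in s:
--             cur = cur + 1 if ch == c else 0
--             if cur > best:
--                 best = cur
--         vals.append(best)
--     vals.sort(reverse=True)
--     return -1 if k - 1 >= len(vals) else vals[k - 1]
-- ===== Notes on version B (the rewrite author's own statement) =====
-- stated objective: alternative
-- what changed: B drops A's single-pass state machine (pre_ch + growing word list, dict updated at run boundaries, stable sort of dict items by negated value) for a per-character design: one dedicated counting scan of s per distinct character yields that character's longest run, and the bare values are sorted descending; no dict of runs and no boundary bookkeeping exist in B.
-- crash fix: On the empty string with k >= 1, A raises IndexError at s[0]; B returns -1 (no k-th value exists). — e.g. on solve_method("", 1): A raises IndexError, B returns -1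
import Mathlib
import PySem

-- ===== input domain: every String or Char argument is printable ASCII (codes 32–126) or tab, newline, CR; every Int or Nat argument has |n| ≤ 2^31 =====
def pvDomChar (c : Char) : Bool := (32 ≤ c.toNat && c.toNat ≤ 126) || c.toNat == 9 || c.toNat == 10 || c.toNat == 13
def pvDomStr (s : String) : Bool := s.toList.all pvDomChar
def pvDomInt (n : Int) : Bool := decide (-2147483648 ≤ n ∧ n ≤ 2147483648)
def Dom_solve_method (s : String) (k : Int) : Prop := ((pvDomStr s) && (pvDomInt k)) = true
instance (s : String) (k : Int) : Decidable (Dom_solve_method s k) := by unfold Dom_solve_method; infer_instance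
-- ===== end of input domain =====

-- B replaces A's single-pass state machine with one counting scan per distinct character
-- and a descending sort of the bare run-length values; equivalence is proved on Pre_
-- (A raises elsewhere).

-- ===== PORT A =====
-- one loop step of A: state = (dic_len, pre_ch, word)
def stepA (st : PySem.Dict Char Int × Char × List Char) (ch : Char) :
    PySem.Dict Char Int × Char × List Char :=
  let (dic, pre, word) := st
  if ch = pre then (dic, pre, word ++ [ch])
  else (dic.insert pre (max (dic.getD pre 0) (word.length : Int)), ch, [ch])

def solve_method (s : String) (k : Int) : Int :=
  match s.toList with
  | [] => 0   -- Python: s[0] raises IndexError here; excluded by Pre_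
  | c :: _ =>
    let st := s.toList.foldl stepA ((PySem.Dict.empty : PySem.Dict Char Int), c, ([] : List Char))
    let dic := if st.2.2 ≠ [] then st.1.insert st.2.1 (max (st.1.getD st.2.1 0) (st.2.2.length : Int)) else st.1
              -- 'if word and pre_ch': pre_ch is a nonempty one-char string, always truthy
    let tuple_len := PySem.List.sorted dic.items (fun x => -x.2) false
    if k - 1 ≥ (tuple_len.length : Int) then -1
    else ((PySem.List.pyGet? tuple_len (k - 1)).map (·.2)).getD 0   -- pyGet? = none excluded by Pre_

-- ===== PORT B =====
-- the inner counting scan: longest run of c in l (best/cur accumulator, as in Source B)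
def bestRun (l : List Char) (c : Char) : Int :=
  (l.foldl (fun st ch =>
    let cur : Int := if ch = c then st.2 + 1 else 0
    (if cur > st.1 then cur else st.1, cur)) ((0 : Int), (0 : Int))).1

def solve_method_alt (s : String) (k : Int) : Int :=
  -- dict.fromkeys(s) = first occurrences in order = PySem.List.dedup
  let vals := (PySem.List.dedup s.toList).map (bestRun s.toList)
  let vals := PySem.List.sorted vals (fun v => v) true
  if k - 1 ≥ (vals.length : Int) then -1
  else (PySem.List.pyGet? vals (k - 1)).getD 0

-- ===== PRECONDITION & SPEC =====
-- Pre_ excludes exactly the inputs where the Python A raises IndexError: the empty string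
-- (s[0]), and k-1 below -(number of distinct characters) = -len(tuple_len) (negative index
-- out of range).
def Pre_solve_method (s : String) (k : Int) : Prop :=
  s.toList ≠ [] ∧ -((PySem.Set.ofList s.toList).length : Int) ≤ k - 1
instance (s : String) (k : Int) : Decidable (Pre_solve_method s k) := by
  unfold Pre_solve_method; infer_instance

def pvWitness_solve_method : String × Int := ("aabcc", 2)

-- On the empty string with k >= 1, A raises IndexError at s[0]; B returns -1.
def Raises_solve_method (s : String) (k : Int) : Prop := s.toList = [] ∧ 1 ≤ k
instance (s : String) (k : Int) : Decidable (Raises_solve_method s k) := by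
  unfold Raises_solve_method; infer_instance
def pvRaiseWitness_solve_method : String × Int := ("", 1)
def pvRaiseWitnessOut_solve_method : Int := -1

def Spec_solve_method (s : String) (k : Int) (out : Int) : Prop := out = solve_method_alt s k
instance (s : String) (k : Int) (out : Int) : Decidable (Spec_solve_method s k out) := by
  unfold Spec_solve_method; infer_instance

-- ===== CLAIM (what is proved, stated in full; the proofs are below) =====
def Claim_equal_solve_method : Prop := ∀ (s : String) (k : Int), Dom_solve_method s k →
  Pre_solve_method s k → Spec_solve_method s k (solve_method s k)

def Claim_raises_solve_method : Prop :=
  (∀ (s : String) (k : Int), Dom_solve_method s k → Raises_solve_method s k → ¬ Pre_solve_method s k) ∧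
  (Dom_solve_method (pvRaiseWitness_solve_method.1) (pvRaiseWitness_solve_method.2) ∧
   Raises_solve_method (pvRaiseWitness_solve_method.1) (pvRaiseWitness_solve_method.2) ∧
   solve_method_alt (pvRaiseWitness_solve_method.1) (pvRaiseWitness_solve_method.2) = pvRaiseWitnessOut_solve_method)

-- ===== LEMMAS AND PROOFS =====

-- proof-side recursive form of the counting scan: longest run given a pending run of length cur
def mr (c : Char) (cur : Int) : List Char → Int
  | [] => cur
  | ch :: t => if ch = c then mr c (cur + 1) t else max cur (mr c 0 t)

theorem mr_ge (c : Char) (l : List Char) : ∀ cur, cur ≤ mr c cur l := by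
  induction l with
  | nil => intro cur; simp [mr]
  | cons ch t ih =>
    intro cur
    by_cases h : ch = c
    · simp only [mr, if_pos h]; exact le_trans (by omega) (ih (cur + 1))
    · simp [mr, h]

theorem bestRun_fold (c : Char) (l : List Char) : ∀ (b cur : Int), 0 ≤ cur → cur ≤ b →
    (l.foldl (fun st ch =>
      let cur : Int := if ch = c then st.2 + 1 else 0
      (if cur > st.1 then cur else st.1, cur)) (b, cur)).1 = max b (mr c cur l) := by
  induction l with
  | nil => intro b cur _ hcb; simp [mr, max_eq_left hcb]
  | cons ch t ih =>
    intro b cur hc hcb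
    by_cases h : ch = c
    · simp only [List.foldl_cons, if_pos h, mr]
      have hm : cur + 1 ≤ mr c (cur + 1) t := mr_ge c t (cur + 1)
      by_cases hgt : cur + 1 > b
      · rw [if_pos hgt, ih (cur + 1) (cur + 1) (by omega) le_rfl]
        omega
      · rw [if_neg hgt, ih b (cur + 1) (by omega) (by omega)]
    · simp only [List.foldl_cons, if_neg h, mr]
      have hgt : ¬ ((0 : Int) > b) := by omega
      rw [if_neg hgt, ih b 0 le_rfl (by omega)]
      have := mr_ge c t (0 : Int)
      omega

theorem bestRun_eq_mr (l : List Char) (c : Char) : bestRun l c = mr c 0 l := by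
  unfold bestRun
  rw [bestRun_fold c l 0 0 le_rfl le_rfl]
  have := mr_ge c l 0
  omega

-- finalize A's loop state
def finA (st : PySem.Dict Char Int × Char × List Char) : PySem.Dict Char Int :=
  if st.2.2 ≠ [] then st.1.insert st.2.1 (max (st.1.getD st.2.1 0) (st.2.2.length : Int)) else st.1

-- MAIN INVARIANT for A's fold from state (d, p, replicate m p) over l
theorem main_inv (l : List Char) : ∀ (d : PySem.Dict Char Int) (p : Char) (m : Nat),
    d.keys.Nodup → 1 ≤ m → (∀ x, 0 ≤ d.getD x 0) →
    (finA (l.foldl stepA (d, p, List.replicate m p))).keys.Nodup ∧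
    (∀ x, x ∈ (finA (l.foldl stepA (d, p, List.replicate m p))).keys ↔
        x ∈ d.keys ∨ x = p ∨ x ∈ l) ∧
    (∀ x, (finA (l.foldl stepA (d, p, List.replicate m p))).getD x 0 =
        if x = p then max (d.getD x 0) (mr p (m : Int) l)
        else max (d.getD x 0) (mr x 0 l)) := by
  induction l with
  | nil =>
    intro d p m hnd hm hpos
    have hne : List.replicate m p ≠ [] := by
      simp [List.replicate_eq_nil_iff]; omega
    simp only [List.foldl_nil, finA, ne_eq, hne, not_false_iff, if_pos]
    refine ⟨PySem.Dict.nodup_keys_insert d p _ hnd, ?_, ?_⟩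
    · intro x
      rw [PySem.Dict.mem_keys_insert]
      simp [or_comm]
    · intro x
      rw [PySem.Dict.getD_insert]
      by_cases hx : x = p
      · subst hx; simp [mr]
      · simp [hx, mr, max_eq_left (hpos x)]
  | cons ch t ih =>
    intro d p m hnd hm hpos
    by_cases h : ch = p
    · subst h
      have hstep : stepA (d, ch, List.replicate m ch) ch = (d, ch, List.replicate (m + 1) ch) := by
        simp [stepA, ← List.replicate_succ']
      rw [List.foldl_cons, hstep]
      obtain ⟨h1, h2, h3⟩ := ih d ch (m + 1) hnd (by omega) hpos
      refine ⟨h1, ?_, ?_⟩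
      · intro x; rw [h2 x]; simp
      · intro x
        rw [h3 x]
        by_cases hx : x = ch
        · subst hx
          have hc : (((m + 1 : Nat)) : Int) = (m : Int) + 1 := by omega
          simp [mr, hc]
        · have hne : ch ≠ x := fun he => hx he.symm
          have hmr : mr x 0 (ch :: t) = mr x 0 t := by
            simp [mr, hne, max_eq_right (mr_ge x t 0)]
          simp [hx, hmr]
    · have hstep : stepA (d, p, List.replicate m p) ch =
          (d.insert p (max (d.getD p 0) ((List.replicate m p).length : Int)), ch, [ch]) := by
        simp [stepA, h]
      rw [List.foldl_cons, hstep]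
      set d' := d.insert p (max (d.getD p 0) ((List.replicate m p).length : Int)) with hd'
      have hnd' : d'.keys.Nodup := PySem.Dict.nodup_keys_insert d p _ hnd
      have hpos' : ∀ x, 0 ≤ d'.getD x 0 := by
        intro x
        rw [hd', PySem.Dict.getD_insert]
        split
        · exact le_max_of_le_left (hpos p)
        · exact hpos x
      have h1c : [ch] = List.replicate 1 ch := by simp
      rw [h1c]
      obtain ⟨h1, h2, h3⟩ := ih d' ch 1 hnd' le_rfl hpos'
      have hlen : ((List.replicate m p).length : Int) = (m : Int) := by simp
      refine ⟨h1, ?_, ?_⟩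
      · intro x
        rw [h2 x, hd', PySem.Dict.mem_keys_insert]
        simp only [List.mem_cons]
        constructor
        · rintro (⟨he | hk⟩ | hc | ht)
          · exact Or.inr (Or.inl he)
          · exact Or.inl hk
          · exact Or.inr (Or.inr (Or.inl hc))
          · exact Or.inr (Or.inr (Or.inr ht))
        · rintro (hk | he | hc | ht)
          · exact Or.inl (Or.inr hk)
          · exact Or.inl (Or.inl he)
          · exact Or.inr (Or.inl hc)
          · exact Or.inr (Or.inr ht)
      · intro x
        rw [h3 x, hd', PySem.Dict.getD_insert]
        by_cases hx : x = ch
        · subst hx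
          have hxp : x ≠ p := h
          simp [mr, hxp]
        · by_cases hxp : x = p
          · subst hxp
            have hchx : ch ≠ x := h
            simp only [if_neg hx, hlen, mr, if_neg hchx, if_true]
            omega
          · have hchx : ch ≠ x := fun he => hx he.symm
            have := mr_ge x t 0
            simp only [if_neg hx, if_neg hxp, mr, if_neg hchx]
            omega

-- values of a nodup-keyed dict = keys mapped through getD
theorem values_eq_keys_map (d : PySem.Dict Char Int) (hnd : d.keys.Nodup) :
    d.values = d.keys.map (fun c => d.getD c 0) := by
  show d.items.map (·.2) = (d.items.map (·.1)).map (fun c => d.getD c 0)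
  rw [List.map_map]
  apply List.map_congr_left
  intro p hp
  exact (PySem.Dict.getD_of_mem_items d (by simpa using hp) hnd 0).symm

-- sorting pairs by negated value then projecting = sorting the values descending
theorem sorted_snd_eq (items : List (Char × Int)) :
    (PySem.List.sorted items (fun x => -x.2) false).map (·.2) =
      PySem.List.sorted (items.map (·.2)) (fun v => v) true := by
  apply List.Perm.eq_of_pairwise (le := fun a b : Int => b ≤ a)
  · intro a b _ _ h1 h2; omega
  · exact (PySem.List.sorted_pairwise items (fun x => -x.2)).map _
      (fun a b hab => by omega)
  · exact PySem.List.sorted_pairwise_rev (items.map (·.2)) (fun v => v)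
  · exact ((PySem.List.sorted_perm items (fun x => -x.2) false).map _).trans
      (PySem.List.sorted_perm (items.map (·.2)) (fun v => v) true).symm

-- sorted descending ignores a permutation of the input (Int values)
theorem sorted_rev_eq_of_perm (v w : List Int) (hp : v.Perm w) :
    PySem.List.sorted v (fun x => x) true = PySem.List.sorted w (fun x => x) true := by
  apply List.Perm.eq_of_pairwise (le := fun a b : Int => b ≤ a)
  · intro a b _ _ h1 h2; omega
  · exact PySem.List.sorted_pairwise_rev v (fun x => x)
  · exact PySem.List.sorted_pairwise_rev w (fun x => x)
  · exact (PySem.List.sorted_perm v (fun x => x) true).trans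
      (hp.trans (PySem.List.sorted_perm w (fun x => x) true).symm)

theorem pyGet?_map {α β : Type} (f : α → β) (l : List α) (i : Int) :
    PySem.List.pyGet? (l.map f) i = (PySem.List.pyGet? l i).map f := by
  simp only [PySem.List.pyGet?, PySem.List.pyIdx?, List.length_map]
  split <;> simp

-- ===== VERDICT (by name: the statement is the Claim_ definition above) =====
theorem solve_method_spec : Claim_equal_solve_method := by
  intro s k _ hpre
  unfold Spec_solve_method
  rcases hl : s.toList with _ | ⟨c, rest⟩
  · exact absurd hl hpre.1
  · -- A's finalized dict, via the invariant
    have hstep0 : stepA (PySem.Dict.empty, c, ([] : List Char)) c =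
        (PySem.Dict.empty, c, List.replicate 1 c) := by simp [stepA]
    obtain ⟨hnd, hmem, hget⟩ := main_inv rest PySem.Dict.empty c 1
      PySem.Dict.nodup_keys_empty le_rfl (by intro x; simp [PySem.Dict.getD_empty])
    set F := finA (rest.foldl stepA (PySem.Dict.empty, c, List.replicate 1 c)) with hF
    -- F's getD is exactly B's bestRun over the whole string
    have hbr : ∀ x, F.getD x 0 = bestRun (c :: rest) x := by
      intro x
      rw [bestRun_eq_mr, hget x]
      by_cases hx : x = c
      · subst hx
        have h1 : mr x 0 (x :: rest) = mr x 1 rest := by simp [mr]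
        have h2 := mr_ge x rest 1
        simp only [PySem.Dict.getD_empty, h1, Nat.cast_one, if_true]
        omega
      · have hcx : c ≠ x := fun he => hx he.symm
        have h1 : mr x 0 (c :: rest) = mr x 0 rest := by
          simp [mr, hcx, max_eq_right (mr_ge x rest 0)]
        have h2 := mr_ge x rest 0
        simp only [if_neg hx, PySem.Dict.getD_empty, h1]
        omega
    -- F's keys are a permutation of the dedup of the string
    have hperm : F.keys.Perm (PySem.List.dedup (c :: rest)) := by
      rw [List.perm_ext_iff_of_nodup hnd (by simpa using PySem.List.nodup_dedup (c :: rest))]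
      intro x
      rw [hmem x, PySem.List.mem_dedup]
      simp [PySem.Dict.keys_empty]
    -- hence A's sorted values = B's sorted values
    have hvalsperm : (F.values).Perm ((PySem.List.dedup (c :: rest)).map (bestRun (c :: rest))) := by
      rw [values_eq_keys_map F hnd]
      have hmapeq : (PySem.List.dedup (c :: rest)).map (fun x => F.getD x 0) =
          (PySem.List.dedup (c :: rest)).map (bestRun (c :: rest)) :=
        List.map_congr_left (fun x _ => hbr x)
      have hp2 := hperm.map (fun x => F.getD x 0)
      rw [hmapeq] at hp2
      exact hp2
    have hsorteq : (PySem.List.sorted F.items (fun x => -x.2) false).map (·.2) =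
        PySem.List.sorted ((PySem.List.dedup (c :: rest)).map (bestRun (c :: rest)))
          (fun v => v) true := by
      rw [sorted_snd_eq F.items]
      exact sorted_rev_eq_of_perm _ _ hvalsperm
    -- assemble
    simp only [solve_method, solve_method_alt, hl]
    rw [List.foldl_cons, hstep0]
    have hfin : (if (rest.foldl stepA (PySem.Dict.empty, c, List.replicate 1 c)).2.2 ≠ [] then
        (rest.foldl stepA (PySem.Dict.empty, c, List.replicate 1 c)).1.insert
          (rest.foldl stepA (PySem.Dict.empty, c, List.replicate 1 c)).2.1
          (max ((rest.foldl stepA (PySem.Dict.empty, c, List.replicate 1 c)).1.getD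
            (rest.foldl stepA (PySem.Dict.empty, c, List.replicate 1 c)).2.1 0)
            (((rest.foldl stepA (PySem.Dict.empty, c, List.replicate 1 c)).2.2.length : Int)))
        else (rest.foldl stepA (PySem.Dict.empty, c, List.replicate 1 c)).1) = F := rfl
    rw [hfin]
    have hlen : ((PySem.List.sorted F.items (fun x => -x.2) false).length : Int) =
        ((PySem.List.sorted ((PySem.List.dedup (c :: rest)).map (bestRun (c :: rest)))
          (fun v => v) true).length : Int) := by
      rw [← hsorteq, List.length_map]
    by_cases hk : k - 1 ≥ ((PySem.List.sorted F.items (fun x => -x.2) false).length : Int)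
    · rw [if_pos hk, if_pos (hlen ▸ hk)]
    · rw [if_neg hk, if_neg (hlen ▸ hk)]
      rw [← hsorteq, pyGet?_map]

theorem solve_method_raises : Claim_raises_solve_method := by
  unfold Claim_raises_solve_method
  exact ⟨by intro s k _ hr hp; exact hp.1 hr.1, by decide⟩

-- the crash-fix witness of solve_method_raises, restated as a plain equation
theorem solve_method_raises_witness : solve_method_alt "" 1 = -1 :=
  solve_method_raises.2.2.2
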